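-- pv_equiv track=rewrite | github.com/bioinformagica/salmonella-bacterial-immunity | workflow/scripts/process_icity.py | get_sequential_groups
-- ===== SOURCE A (Python) =====
-- def get_sequential_groups(vals: iter) -> list:
--     """ This functions take as input a SORTED iterables with UNIQUE values
--         and returns a list with all groups that are sequential labaled by a
--         interger index.
--         Ex:
--         $ get_sequential_groups([1528, 1529, 1530, 1531, 1559, 1560, 1561, 1562, 1565, 1566])
--         [1, 1, 1, 1, 2, 2, 2, 2, 3, 3]
--     """
--     groups_index = 1
--     groups = []
--     stack = []
--     for i in vals:
--
--         if not stack: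
--             stack.append(i)
--             groups.append(groups_index)
--             continue
--
--         if i == stack[-1] + 1:
--             stack.append(i)
--             groups.append(groups_index)
--
--         else:
--             groups_index += 1
--             groups.append(groups_index)
--             stack = [i]
--
--     return groups
-- ===== SOURCE B (Python) =====
-- def get_sequential_groups(vals: iter) -> list:
--     # Run-decomposition: instead of labelling element by element, find each
--     # maximal consecutive run [i, j) with an inner scan, then emit its label
--     # as a block via list repetition.
--     xs = list(vals)
--     n = len(xs)
--     out = []
--     label = 1
--     i = 0
--     while i < n:
--         j = i + 1
--         while j < n and xs[j] == xs[j - 1] + 1: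
--             j += 1
--         out.extend([label] * (j - i))
--         label += 1
--         i = j
--     return out
-- ===== Notes on version B (the rewrite author's own statement) =====
-- stated objective: alternative
-- what changed: Replaces A's per-element stack machine (one state update and one label append per element) with a run decomposition: an inner scan finds each maximal consecutive run and its label is emitted as a whole block by list repetition, outer loop advancing run by run.
import Mathlib
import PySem

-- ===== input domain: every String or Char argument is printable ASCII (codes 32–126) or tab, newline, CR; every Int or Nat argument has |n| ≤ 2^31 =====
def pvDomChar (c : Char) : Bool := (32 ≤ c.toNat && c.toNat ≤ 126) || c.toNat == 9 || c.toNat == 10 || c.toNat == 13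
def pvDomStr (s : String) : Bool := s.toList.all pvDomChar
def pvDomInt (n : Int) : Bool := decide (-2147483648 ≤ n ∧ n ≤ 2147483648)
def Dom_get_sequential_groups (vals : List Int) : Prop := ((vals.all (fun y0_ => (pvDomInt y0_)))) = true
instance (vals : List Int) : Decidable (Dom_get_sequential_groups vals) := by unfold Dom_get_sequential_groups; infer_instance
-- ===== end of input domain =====

-- B replaces A's per-element stack machine with a maximal-run decomposition emitting each label as a replicated block (alternative decomposition, same cost).


-- ===== PORT A =====
-- state (groups_index, groups, stack); stack[-1] is the stack's last element,
-- read with getLast! only in the branch where the stack is nonempty (exact there).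
def get_sequential_groups (vals : List Int) : List Int :=
  (vals.foldl
    (fun (st : Int × List Int × List Int) i =>
      let (gi, groups, stack) := st
      if stack.isEmpty then
        (gi, groups ++ [gi], stack ++ [i])
      else if i = stack.getLast! + 1 then
        (gi, groups ++ [gi], stack ++ [i])
      else
        (gi + 1, groups ++ [gi + 1], [i]))
    (1, [], [])).2.1

-- ===== PORT B =====
-- inner while loop of Source B: number of further elements continuing the run
-- whose last value so far is p (j advances while xs[j] == xs[j-1] + 1)
def pvRunCont (p : Int) : List Int → Nat
  | [] => 0
  | v :: r => if v = p + 1 then 1 + pvRunCont v r else 0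

-- outer while loop of Source B: emit the maximal run's label as a block, advance past it
def pvEmitRuns (label : Int) : List Int → List Int
  | [] => []
  | x :: rest =>
    List.replicate (1 + pvRunCont x rest) label ++
      pvEmitRuns (label + 1) (rest.drop (pvRunCont x rest))
termination_by l => l.length
decreasing_by simp only [List.length_drop, List.length_cons]; omega

def get_sequential_groups_alt (vals : List Int) : List Int :=
  pvEmitRuns 1 vals

-- ===== PRECONDITION & SPEC =====
def Spec_get_sequential_groups (vals : List Int) (out : List Int) : Prop := out = get_sequential_groups_alt vals
instance (vals : List Int) (out : List Int) : Decidable (Spec_get_sequential_groups vals out) := by unfold Spec_get_sequential_groups; infer_instance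

-- ===== CLAIM (what is proved, stated in full; the proofs are below) =====
def Claim_equal_get_sequential_groups : Prop := ∀ (vals : List Int), Dom_get_sequential_groups vals → Spec_get_sequential_groups vals (get_sequential_groups vals)

-- ===== LEMMAS AND PROOFS =====

-- reference labelling: labels for l given current label g and previous value p
def pvSpecRun (g : Int) (p : Int) : List Int → List Int
  | [] => []
  | v :: r => if v = p + 1 then g :: pvSpecRun g v r else (g + 1) :: pvSpecRun (g + 1) v r

theorem pvA_fold (l : List Int) :
    ∀ (gi : Int) (acc : List Int) (s : List Int) (p : Int),
    (l.foldl
      (fun (st : Int × List Int × List Int) i =>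
        let (gi, groups, stack) := st
        if stack.isEmpty then
          (gi, groups ++ [gi], stack ++ [i])
        else if i = stack.getLast! + 1 then
          (gi, groups ++ [gi], stack ++ [i])
        else
          (gi + 1, groups ++ [gi + 1], [i]))
      (gi, acc, s ++ [p])).2.1 = acc ++ pvSpecRun gi p l := by
  induction l with
  | nil => intro gi acc s p; simp [pvSpecRun]
  | cons v r ih =>
    intro gi acc s p
    simp only [List.foldl_cons]
    have hne : ((s ++ [p]).isEmpty) = false := by simp
    have hlast : (s ++ [p]).getLast! = p := by
      simp [List.getLast!_eq_getLast?_getD]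
    by_cases hv : v = p + 1
    · simp only [hne, hlast, Bool.false_eq_true, if_false, pvSpecRun, if_pos hv]
      have := ih gi (acc ++ [gi]) (s ++ [p]) v
      simpa [List.append_assoc] using this
    · simp only [hne, hlast, pvSpecRun, if_neg hv, Bool.false_eq_true, if_false]
      have := ih (gi + 1) (acc ++ [gi + 1]) [] v
      simpa [List.append_assoc, hv] using this

theorem pvRep1 (k : Nat) (x : Int) (l : List Int) :
    x :: (List.replicate k x ++ l) = List.replicate (1 + k) x ++ l := by
  rw [Nat.add_comm]; simp [List.replicate_succ]

theorem pvSpecRun_eq_runs (l : List Int) :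
    ∀ (p : Int) (g : Int),
    pvSpecRun g p l =
      List.replicate (pvRunCont p l) g ++ pvEmitRuns (g + 1) (l.drop (pvRunCont p l)) := by
  induction l with
  | nil => intro p g; simp [pvSpecRun, pvRunCont, pvEmitRuns]
  | cons v r ih =>
    intro p g
    by_cases hv : v = p + 1
    · rw [show pvRunCont p (v :: r) = 1 + pvRunCont v r from by simp [pvRunCont, hv]]
      rw [Nat.add_comm 1, List.replicate_succ, List.drop_succ_cons, List.cons_append]
      simp only [pvSpecRun, if_pos hv]
      rw [ih v g]
    · rw [show pvRunCont p (v :: r) = 0 from by simp [pvRunCont, hv]]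
      simp only [List.replicate, List.drop, List.nil_append]
      rw [pvEmitRuns]
      simp only [pvSpecRun, if_neg hv]
      rw [ih v (g + 1), pvRep1]

-- ===== VERDICT (by name: the statement is the Claim_ definition above) =====
theorem get_sequential_groups_spec : Claim_equal_get_sequential_groups := by
  intro vals _
  unfold Spec_get_sequential_groups get_sequential_groups get_sequential_groups_alt
  cases vals with
  | nil => simp [pvEmitRuns]
  | cons v r =>
    have hA := pvA_fold r 1 [1] [] v
    simp only [List.foldl_cons, List.isEmpty_nil, if_true, List.nil_append] at *
    rw [hA, pvEmitRuns, pvSpecRun_eq_runs r v 1]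
    exact pvRep1 _ _ _
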